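-- pv_equiv track=rewrite | github.com/MrBrantCode/unitest_baseline | mut_generate/mist_train_taco/taco_2615/solution.py | find_smallest_pretty_integer
-- ===== SOURCE A (Python) =====
-- def find_smallest_pretty_integer(list1, list2):
--     # Find common digits between list1 and list2
--     common_digits = [digit for digit in list1 if digit in list2]
--
--     if common_digits:
--         # If there are common digits, return the smallest one
--         return min(common_digits)
--     else:
--         # If no common digits, find the smallest digit in each list
--         min_list1 = min(list1)
--         min_list2 = min(list2)
--
--         # Form the smallest pretty integer by concatenating the smallest digits
--         if min_list1 < min_list2:
--             return int(f"{min_list1}{min_list2}")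
--         else:
--             return int(f"{min_list2}{min_list1}")
-- ===== SOURCE B (Python) =====
-- def find_smallest_pretty_integer(list1, list2):
--     # Two-pointer merge over both sorted lists: advance the pointer at the
--     # smaller value; the first equal pair is the smallest common value.
--     s1 = sorted(list1)
--     s2 = sorted(list2)
--     i = j = 0
--     while i < len(s1) and j < len(s2):
--         if s1[i] == s2[j]:
--             return s1[i]
--         if s1[i] < s2[j]:
--             i += 1
--         else:
--             j += 1
--     # No common value: concatenate the two minima (the sorted heads), smaller first.
--     lo, hi = s1[0], s2[0]
--     if hi < lo:
--         lo, hi = hi, lo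
--     return int(f"{lo}{hi}")
-- ===== Notes on version B (the rewrite author's own statement) =====
-- stated objective: faster
-- what changed: B replaces A's intersection list (a linear 'in list2' scan per element of list1) and its separate min passes by sorting both lists once and running a two-pointer merge that finds the smallest common value with no membership test at all; the no-common branch concatenates the two sorted heads.
import Mathlib
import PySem

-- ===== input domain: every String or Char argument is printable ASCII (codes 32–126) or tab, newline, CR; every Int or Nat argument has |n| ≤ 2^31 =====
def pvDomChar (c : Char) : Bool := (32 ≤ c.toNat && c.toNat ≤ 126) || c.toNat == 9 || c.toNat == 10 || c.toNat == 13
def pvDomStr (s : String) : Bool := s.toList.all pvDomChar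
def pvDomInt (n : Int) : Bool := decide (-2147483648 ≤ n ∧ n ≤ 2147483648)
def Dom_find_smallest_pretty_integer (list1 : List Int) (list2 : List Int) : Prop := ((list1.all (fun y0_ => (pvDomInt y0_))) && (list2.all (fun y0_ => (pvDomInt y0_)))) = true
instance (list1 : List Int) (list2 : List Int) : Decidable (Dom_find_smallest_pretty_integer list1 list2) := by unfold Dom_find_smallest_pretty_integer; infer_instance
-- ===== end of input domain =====

-- B sorts both lists once and finds the smallest common value by a two-pointer
-- merge (no membership tests); objective: faster (O(n log n + m log m) vs A's O(n*m)).

-- ===== PORT A =====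
def find_smallest_pretty_integer (list1 : List Int) (list2 : List Int) : Int :=
  let common_digits := list1.filter (fun digit => list2.contains digit)
  if common_digits ≠ [] then
    (PySem.List.min? common_digits (fun x => x)).getD 0
  else
    match PySem.List.min? list1 (fun x => x), PySem.List.min? list2 (fun x => x) with
    | some min_list1, some min_list2 =>
      if min_list1 < min_list2 then
        (PySem.Int.ofChars? (PySem.Int.toChars min_list1 ++ PySem.Int.toChars min_list2)).getD 0
      else
        (PySem.Int.ofChars? (PySem.Int.toChars min_list2 ++ PySem.Int.toChars min_list1)).getD 0
    | _, _ => 0   -- min([]) raises ValueError; excluded by Pre_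

-- ===== PORT B =====
-- The while loop of Source B: two pointers into the sorted lists, transcribed as
-- recursion on the two suffixes (the pointer increments are the tail steps).
def pvMergeCommon : List Int → List Int → Option Int
  | x :: xs, y :: ys =>
    if x = y then some x
    else if x < y then pvMergeCommon xs (y :: ys)
    else pvMergeCommon (x :: xs) ys
  | _, _ => none
termination_by a b => a.length + b.length

def find_smallest_pretty_integer_alt (list1 : List Int) (list2 : List Int) : Int :=
  let s1 := PySem.List.sorted list1 (fun x => x) false
  let s2 := PySem.List.sorted list2 (fun x => x) false
  match pvMergeCommon s1 s2 with
  | some d => d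
  | none =>
    match PySem.List.pyGet? s1 0 with
    | none => 0   -- s1[0] raises IndexError on an empty list; excluded by Pre_
    | some lo =>
      match PySem.List.pyGet? s2 0 with
      | none => 0   -- s2[0] raises IndexError on an empty list; excluded by Pre_
      | some hi =>
        let p := if hi < lo then (hi, lo) else (lo, hi)
        (PySem.Int.ofChars? (PySem.Int.toChars p.1 ++ PySem.Int.toChars p.2)).getD 0

-- ===== PRECONDITION & SPEC =====
-- Pre_ excludes exactly the inputs where both programs raise: an empty list
-- (A: ValueError from min([]); B: IndexError from s1[0]), and the no-common-value
-- case with both minima negative, where int(f"{lo}{hi}") parses a string like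
-- "-5-3" and raises ValueError in both.
def Pre_find_smallest_pretty_integer (list1 : List Int) (list2 : List Int) : Prop :=
  list1 ≠ [] ∧ list2 ≠ [] ∧
    ((∃ x ∈ list1, x ∈ list2) ∨ (∀ x ∈ list1, 0 ≤ x) ∨ (∀ x ∈ list2, 0 ≤ x))
instance (list1 : List Int) (list2 : List Int) : Decidable (Pre_find_smallest_pretty_integer list1 list2) := by unfold Pre_find_smallest_pretty_integer; infer_instance

def pvWitness_find_smallest_pretty_integer : List Int × List Int := ([3, 1, 2], [5, 2, 7])

def Spec_find_smallest_pretty_integer (list1 : List Int) (list2 : List Int) (out : Int) : Prop := out = find_smallest_pretty_integer_alt list1 list2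
instance (list1 : List Int) (list2 : List Int) (out : Int) : Decidable (Spec_find_smallest_pretty_integer list1 list2 out) := by unfold Spec_find_smallest_pretty_integer; infer_instance

-- ===== CLAIM =====
def Claim_equal_find_smallest_pretty_integer : Prop := ∀ (list1 : List Int) (list2 : List Int), Dom_find_smallest_pretty_integer list1 list2 → Pre_find_smallest_pretty_integer list1 list2 → Spec_find_smallest_pretty_integer list1 list2 (find_smallest_pretty_integer list1 list2)

-- ===== LEMMAS AND PROOFS =====

-- On two ≤-sorted lists, the merge returns none exactly when no value is common.
lemma pvMergeCommon_none :
    ∀ (a b : List Int), a.Pairwise (· ≤ ·) → b.Pairwise (· ≤ ·) →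
      pvMergeCommon a b = none → ∀ z ∈ a, z ∉ b := by
  intro a b
  induction a, b using pvMergeCommon.induct with
  | case1 xs y ys =>
    intro _ _ h; simp [pvMergeCommon] at h
  | case2 x xs y ys hxy hlt ih =>
    intro ha hb h z hz hzb
    rw [pvMergeCommon, if_neg hxy, if_pos hlt] at h
    rcases List.mem_cons.mp hz with rfl | hz'
    · -- z = x < y ≤ every element of y::ys, so z ∉ y::ys
      rcases List.mem_cons.mp hzb with rfl | hzys
      · exact hxy rfl
      · exact absurd (lt_of_lt_of_le hlt ((List.pairwise_cons.mp hb).1 _ hzys)) (lt_irrefl z)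
    · exact ih (List.pairwise_cons.mp ha).2 hb h z hz' hzb
  | case3 x xs y ys hxy hlt ih =>
    intro ha hb h z hz hzb
    rw [pvMergeCommon, if_neg hxy, if_neg hlt] at h
    have hyx : y < x := lt_of_le_of_ne (not_lt.mp hlt) (fun e => hxy e.symm)
    rcases List.mem_cons.mp hzb with rfl | hzys
    · -- z = y < x ≤ every element of x::xs, so z ∉ x::xs
      rcases List.mem_cons.mp hz with rfl | hzxs
      · exact hxy rfl
      · exact absurd (lt_of_lt_of_le hyx ((List.pairwise_cons.mp ha).1 _ hzxs)) (lt_irrefl z)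
    · exact ih ha (List.pairwise_cons.mp hb).2 h z hz hzys
  | case4 a b hshape =>
    intro _ _ _ z hz hzb
    cases a with
    | nil => simp at hz
    | cons x xs =>
      cases b with
      | nil => simp at hzb
      | cons y ys => exact hshape x xs y ys rfl rfl

-- On two ≤-sorted lists, a value returned by the merge is common and minimal
-- among common values.
lemma pvMergeCommon_some :
    ∀ (a b : List Int), a.Pairwise (· ≤ ·) → b.Pairwise (· ≤ ·) →
      ∀ {d : Int}, pvMergeCommon a b = some d →
        d ∈ a ∧ d ∈ b ∧ ∀ z, z ∈ a → z ∈ b → d ≤ z := by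
  intro a b
  induction a, b using pvMergeCommon.induct with
  | case1 xs y ys =>
    intro ha hb d h
    simp only [pvMergeCommon, if_true] at h
    injection h with h
    subst h
    refine ⟨List.mem_cons_self, List.mem_cons_self, ?_⟩
    intro z hz _
    rcases List.mem_cons.mp hz with rfl | hz'
    · exact le_refl _
    · exact (List.pairwise_cons.mp ha).1 _ hz'
  | case2 x xs y ys hxy hlt ih =>
    intro ha hb d h
    rw [pvMergeCommon, if_neg hxy, if_pos hlt] at h
    obtain ⟨hda, hdb, hmin⟩ := ih (List.pairwise_cons.mp ha).2 hb h
    refine ⟨List.mem_cons_of_mem _ hda, hdb, ?_⟩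
    intro z hz hzb
    rcases List.mem_cons.mp hz with rfl | hz'
    · -- z = x cannot be in y::ys since x < y ≤ all of ys
      rcases List.mem_cons.mp hzb with rfl | hzys
      · exact absurd rfl hxy
      · exact absurd (lt_of_lt_of_le hlt ((List.pairwise_cons.mp hb).1 _ hzys)) (lt_irrefl z)
    · exact hmin z hz' hzb
  | case3 x xs y ys hxy hlt ih =>
    intro ha hb d h
    rw [pvMergeCommon, if_neg hxy, if_neg hlt] at h
    have hyx : y < x := lt_of_le_of_ne (not_lt.mp hlt) (fun e => hxy e.symm)
    obtain ⟨hda, hdb, hmin⟩ := ih ha (List.pairwise_cons.mp hb).2 h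
    refine ⟨hda, List.mem_cons_of_mem _ hdb, ?_⟩
    intro z hz hzb
    rcases List.mem_cons.mp hzb with rfl | hzys
    · -- z = y cannot be in x::xs since y < x ≤ all of xs
      rcases List.mem_cons.mp hz with rfl | hzxs
      · exact absurd rfl hxy
      · exact absurd (lt_of_lt_of_le hyx ((List.pairwise_cons.mp ha).1 _ hzxs)) (lt_irrefl z)
    · exact hmin z hz hzys
  | case4 a b hshape =>
    intro _ _ d h
    cases a with
    | nil => simp [pvMergeCommon] at h
    | cons x xs =>
      cases b with
      | nil => simp [pvMergeCommon] at h
      | cons y ys => exact (hshape x xs y ys rfl rfl).elim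

-- ===== VERDICT =====
theorem find_smallest_pretty_integer_spec : Claim_equal_find_smallest_pretty_integer := by
  intro list1 list2 _ hpre
  obtain ⟨h1ne, h2ne, -⟩ := hpre
  unfold Spec_find_smallest_pretty_integer find_smallest_pretty_integer find_smallest_pretty_integer_alt
  set s1 := PySem.List.sorted list1 (fun x => x) false with hs1
  set s2 := PySem.List.sorted list2 (fun x => x) false with hs2
  have hp1 : s1.Pairwise (· ≤ ·) := PySem.List.sorted_pairwise list1 (fun x => x)
  have hp2 : s2.Pairwise (· ≤ ·) := PySem.List.sorted_pairwise list2 (fun x => x)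
  have hm1 : ∀ x, x ∈ s1 ↔ x ∈ list1 := fun x => PySem.List.mem_sorted list1 (fun x => x) false x
  have hm2 : ∀ x, x ∈ s2 ↔ x ∈ list2 := fun x => PySem.List.mem_sorted list2 (fun x => x) false x
  set common := list1.filter (fun digit => list2.contains digit) with hc
  by_cases hce : common = []
  · -- no common value: the merge returns none, both take the concat branch
    have hnone : pvMergeCommon s1 s2 = none := by
      cases hmc : pvMergeCommon s1 s2 with
      | none => rfl
      | some d =>
        obtain ⟨hda, hdb, -⟩ := pvMergeCommon_some s1 s2 hp1 hp2 hmc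
        have : d ∈ common := by
          rw [hc, List.mem_filter]
          exact ⟨(hm1 d).mp hda, by simp [(hm2 d).mp hdb]⟩
        simp [hce] at this
    simp only [hce, hnone]
    simp only [ne_eq, not_true_eq_false, if_false]
    -- heads of the sorted lists are the minima
    obtain ⟨a1, t1, he1⟩ := List.exists_cons_of_ne_nil
      (fun e => h1ne ((PySem.List.sorted_eq_nil_iff list1 (fun x => x) false).mp e))
    obtain ⟨a2, t2, he2⟩ := List.exists_cons_of_ne_nil
      (fun e => h2ne ((PySem.List.sorted_eq_nil_iff list2 (fun x => x) false).mp e))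
    have ha1min : ∀ y ∈ list1, a1 ≤ y := PySem.List.key_head_sorted_le list1 (fun x => x) he1
    have ha2min : ∀ y ∈ list2, a2 ≤ y := PySem.List.key_head_sorted_le list2 (fun x => x) he2
    have ha1mem : a1 ∈ list1 := (hm1 a1).mp (by rw [hs1, he1]; exact List.mem_cons_self)
    have ha2mem : a2 ∈ list2 := (hm2 a2).mp (by rw [hs2, he2]; exact List.mem_cons_self)
    rcases hq1 : PySem.List.min? list1 (fun x => x) with _ | m1
    · rw [PySem.List.min?_eq_none_iff] at hq1; exact absurd hq1 h1ne
    rcases hq2 : PySem.List.min? list2 (fun x => x) with _ | m2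
    · rw [PySem.List.min?_eq_none_iff] at hq2; exact absurd hq2 h2ne
    have hm1v : m1 = a1 := le_antisymm (PySem.List.min?_isMin hq1 a1 ha1mem)
      (ha1min m1 (PySem.List.min?_mem hq1))
    have hm2v : m2 = a2 := le_antisymm (PySem.List.min?_isMin hq2 a2 ha2mem)
      (ha2min m2 (PySem.List.min?_mem hq2))
    subst hm1v hm2v
    rw [hs1, hs2, he1, he2]
    simp only [PySem.List.pyGet?_zero_cons]
    rcases lt_trichotomy m1 m2 with hlt | heq | hgt
    · simp [hlt, not_lt.mpr (le_of_lt hlt)]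
    · subst heq; simp
    · simp [not_lt.mpr (le_of_lt hgt), hgt]
  · -- common value exists: A returns min(common), B the merge result
    simp only [ne_eq, hce, not_false_iff, if_true]
    obtain ⟨c, hcmem⟩ := List.exists_mem_of_ne_nil common hce
    have hc1 : c ∈ list1 := (List.mem_filter.mp (hc ▸ hcmem)).1
    have hc2 : c ∈ list2 := by
      have := (List.mem_filter.mp (hc ▸ hcmem)).2; simpa using this
    cases hmc : pvMergeCommon s1 s2 with
    | none =>
      exact absurd hc2 (pvMergeCommon_none s1 s2 hp1 hp2 hmc c ((hm1 c).mpr hc1) ∘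
        (hm2 c).mpr)
    | some d =>
      obtain ⟨hda, hdb, hmin⟩ := pvMergeCommon_some s1 s2 hp1 hp2 hmc
      have hd1 : d ∈ list1 := (hm1 d).mp hda
      have hd2 : d ∈ list2 := (hm2 d).mp hdb
      have hdcommon : d ∈ common := by
        rw [hc, List.mem_filter]; exact ⟨hd1, by simp [hd2]⟩
      rcases hmin' : PySem.List.min? common (fun x => x) with _ | m
      · rw [PySem.List.min?_eq_none_iff] at hmin'; exact absurd hmin' hce
      have hm_mem : m ∈ common := PySem.List.min?_mem hmin'
      have hm1' : m ∈ list1 := (List.mem_filter.mp (hc ▸ hm_mem)).1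
      have hm2' : m ∈ list2 := by
        have := (List.mem_filter.mp (hc ▸ hm_mem)).2; simpa using this
      have hdm : d ≤ m := hmin m ((hm1 m).mpr hm1') ((hm2 m).mpr hm2')
      have hmd : m ≤ d := PySem.List.min?_isMin hmin' d hdcommon
      simp [le_antisymm hmd hdm]
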